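-- pv_equiv track=rewrite | github.com/yurkuul/codingBat | list_2/Sum67.py | sum67
-- ===== SOURCE A (Python) =====
-- def sum67(nums):
--     index = 0
--     total = 0
--     inBetween = False
--     while (index < len(nums)):
--         if (nums[index] == 6):
--             inBetween = True
--         if (not inBetween):
--             total += nums[index]
--         if (nums[index] == 7):
--             inBetween = False
--         index += 1
--     return total
-- ===== SOURCE B (Python) =====
-- def sum67(nums):
--     total = 0
--     i = 0
--     n = len(nums)
--     while i < n:
--         if nums[i] == 6:
--             while i < n and nums[i] != 7:
--                 i += 1
--         else:
--             total += nums[i]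
--         i += 1
--     return total
-- ===== Notes on version B (the rewrite author's own statement) =====
-- stated objective: idiomatic
-- what changed: Replaces the boolean inBetween state machine with an index loop that, on seeing a 6, runs an inner skip-until-7 loop and steps past the 7, so no flag is carried across iterations.
import Mathlib
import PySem

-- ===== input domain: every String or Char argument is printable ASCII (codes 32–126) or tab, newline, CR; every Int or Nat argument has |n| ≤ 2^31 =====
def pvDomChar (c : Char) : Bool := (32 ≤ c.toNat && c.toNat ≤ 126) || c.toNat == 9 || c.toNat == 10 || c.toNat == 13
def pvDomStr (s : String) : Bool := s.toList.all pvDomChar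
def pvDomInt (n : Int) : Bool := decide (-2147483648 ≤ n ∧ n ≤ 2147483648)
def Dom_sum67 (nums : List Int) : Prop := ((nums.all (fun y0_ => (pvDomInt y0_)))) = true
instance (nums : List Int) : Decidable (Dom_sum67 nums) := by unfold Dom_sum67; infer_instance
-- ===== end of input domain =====

-- ===== PORT A =====
-- B replaces A's boolean state machine with an explicit skip-until-7 inner loop; return values equal.
def sum67Go : List Int → Int → Bool → Int
  | [], total, _ => total
  | x :: xs, total, inBetween =>
    let inB1 := if x = 6 then true else inBetween
    let total1 := if !inB1 then total + x else total
    let inB2 := if x = 7 then false else inB1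
    sum67Go xs total1 inB2

def sum67 (nums : List Int) : Int := sum67Go nums 0 false

-- ===== PORT B =====
-- inner `while i < n and nums[i] != 7: i += 1`; the caller's i += 1 then drops the 7 itself
def skip7 : List Int → List Int
  | [] => []
  | x :: xs => if x = 7 then xs else skip7 xs

theorem skip7_length_le : ∀ (l : List Int), (skip7 l).length ≤ l.length
  | [] => le_refl _
  | x :: xs => by
    simp only [skip7]
    split
    · simp
    · exact le_trans (skip7_length_le xs) (by simp)

def sum67AltGo : List Int → Int → Int
  | [], total => total
  | x :: xs, total =>
    if x = 6 then sum67AltGo (skip7 (x :: xs)) total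
    else sum67AltGo xs (total + x)
  termination_by l _ => l.length
  decreasing_by
    · simp only [skip7, if_neg (by omega : ¬ x = (7:Int))]
      exact Nat.lt_succ_of_le (skip7_length_le xs)
    · simp

def sum67_alt (nums : List Int) : Int := sum67AltGo nums 0

-- ===== PRECONDITION & SPEC =====
def Spec_sum67 (nums : List Int) (out : Int) : Prop := out = sum67_alt nums
instance (nums : List Int) (out : Int) : Decidable (Spec_sum67 nums out) := by unfold Spec_sum67; infer_instance

-- ===== CLAIM (what is proved, stated in full; the proofs are below) =====
def Claim_equal_sum67 : Prop := ∀ (nums : List Int), Dom_sum67 nums → Spec_sum67 nums (sum67 nums)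

-- ===== LEMMAS AND PROOFS =====

-- ===== VERDICT (by name: the statement is the Claim_ definition above) =====
theorem go_true_skip : ∀ (l : List Int) (total : Int),
    sum67Go l total true = sum67Go (skip7 l) total false := by
  intro l
  induction l with
  | nil => intro total; rfl
  | cons x xs ih =>
    intro total
    by_cases h7 : x = 7
    · simp [sum67Go, skip7, h7]
    · simp [sum67Go, skip7, h7, ih]

theorem go_false_alt : ∀ (n : ℕ) (l : List Int) (total : Int), l.length ≤ n →
    sum67Go l total false = sum67AltGo l total := by
  intro n
  induction n with
  | zero =>
    intro l total h
    have : l = [] := List.eq_nil_of_length_eq_zero (Nat.le_zero.mp h)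
    simp [this, sum67Go, sum67AltGo]
  | succ n ih =>
    intro l total h
    cases l with
    | nil => simp [sum67Go, sum67AltGo]
    | cons x xs =>
      simp only [List.length_cons, Nat.succ_le_succ_iff] at h
      rw [sum67AltGo]
      by_cases h6 : x = 6
      · subst h6
        simp only [sum67Go, skip7]
        norm_num
        rw [go_true_skip]
        exact ih _ _ (le_trans (skip7_length_le xs) h)
      · rw [if_neg h6]
        by_cases h7 : x = 7 <;>
          · simp only [sum67Go, h6, h7, if_true, if_false, Bool.not_false, ite_self]
            exact ih _ _ h
    
theorem sum67_spec : Claim_equal_sum67 := by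
  intro nums _
  unfold Spec_sum67 sum67 sum67_alt
  exact go_false_alt nums.length nums 0 (le_refl _)
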